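-- pv_equiv track=rewrite | github.com/markkareemdev/Bloomberg_Algo_TOOLBOX | candycrush.py | crush_candy
-- ===== SOURCE A (Python) =====
-- def crush_candy(arr):
--
--
--     # get the length of the array
--     l = len(arr)
--
--     # create an empty array to store reults
--     results = []
--
--     # add the first element of the array with its count
--     results.append([arr[0], 1])
--
--     # loop through the original array
--     for i in range(1, l):
--
--         # get the index of the previous element
--         prev = i-1
--
--         # check if prev and current are the same
--
--         # not same
--         if arr[i] != arr[prev]:
--
--             # check if count > 3
--             if results[-1][1] >= 3:
--                 results.pop()
--
--             if results and results[-1][0] == arr[i]: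
--                 results[-1][1] += 1
--             else:
--                 results.append([arr[i], 1])
--
--         else:
--
--             results[-1][1] += 1
--
--     if results[-1][1] >= 3:
--         results.pop()
--
--     leftovers = [r[0] for r in results]
--     c = ''.join(leftovers)
--     return c
-- ===== SOURCE B (Python) =====
-- def crush_candy(arr):
--     # run-length encode the input
--     runs = []
--     for x in arr:
--         if runs and runs[-1][0] == x:
--             runs[-1] = (runs[-1][0], runs[-1][1] + 1)
--         else:
--             runs.append((x, 1))
--     # repeatedly delete the leftmost run of length >= 3, merging its neighbours
--     while True:
--         i = next((j for j, r in enumerate(runs) if r[1] >= 3), None)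
--         if i is None:
--             break
--         del runs[i]
--         if 0 < i < len(runs) and runs[i - 1][0] == runs[i][0]:
--             runs[i - 1] = (runs[i - 1][0], runs[i - 1][1] + runs[i][1])
--             del runs[i]
--     return ''.join(k for k, _ in runs)
-- ===== Notes on version B (the rewrite author's own statement) =====
-- stated objective: alternative
-- what changed: Replaces A's single-pass element-by-element stack of [char,count] pairs (with lazy pop at each boundary) by run-length encoding followed by repeatedly deleting the leftmost run of length >= 3 (merging the neighbouring runs) until a fixpoint, then emitting one element per surviving run.
import Mathlib
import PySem

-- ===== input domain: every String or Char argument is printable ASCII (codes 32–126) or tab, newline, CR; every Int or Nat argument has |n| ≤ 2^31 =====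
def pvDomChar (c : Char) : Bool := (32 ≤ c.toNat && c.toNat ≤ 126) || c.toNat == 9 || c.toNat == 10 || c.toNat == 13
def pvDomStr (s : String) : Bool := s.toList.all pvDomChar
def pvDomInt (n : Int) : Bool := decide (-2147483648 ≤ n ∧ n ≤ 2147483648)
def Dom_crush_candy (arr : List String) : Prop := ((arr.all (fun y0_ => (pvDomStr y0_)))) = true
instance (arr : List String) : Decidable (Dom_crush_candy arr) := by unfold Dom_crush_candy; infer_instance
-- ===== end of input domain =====

-- B replaces A's single-pass element stack by run-length encoding plus repeated deletion of the
-- leftmost run of length ≥ 3 (merging neighbours) until a fixpoint; objective: alternative algorithm.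

-- results[-1] (with a dummy default; A never reads it on an empty stack under Pre_)
def pvLast (res : List (String × Int)) : String × Int := res.getLast?.getD ("", 0)

-- ===== PORT A =====
def crush_candy (arr : List String) : String :=
  let l : Int := arr.length
  let results : List (String × Int) := []
  -- results.append([arr[0], 1])
  let results := results ++ [(PySem.List.pyGetD arr 0 "", 1)]
  -- for i in range(1, l)
  let results := (PySem.List.pyRange 1 l 1).foldl (fun results i =>
    let prev := i - 1
    if PySem.List.pyGetD arr i "" ≠ PySem.List.pyGetD arr prev "" then
      let results := if 3 ≤ (pvLast results).2 then results.dropLast else results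
      if results ≠ [] ∧ (pvLast results).1 = PySem.List.pyGetD arr i "" then
        results.dropLast ++ [((pvLast results).1, (pvLast results).2 + 1)]
      else
        results ++ [(PySem.List.pyGetD arr i "", 1)]
    else
      results.dropLast ++ [((pvLast results).1, (pvLast results).2 + 1)]) results
  let results := if 3 ≤ (pvLast results).2 then results.dropLast else results
  let leftovers := results.map (fun r => r.1)
  PySem.Str.join "" leftovers

-- ===== PORT B =====
-- del runs[i]; then, if the (new) neighbours at i-1 and i carry the same element, merge them
def pvIdxStep (runs : List (String × Int)) (i : Nat) : List (String × Int) :=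
  let rs := runs.eraseIdx i
  if 0 < i ∧ i < rs.length ∧ (rs.getD (i - 1) ("", 0)).1 = (rs.getD i ("", 0)).1 then
    (rs.set (i - 1) ((rs.getD (i - 1) ("", 0)).1, (rs.getD (i - 1) ("", 0)).2 + (rs.getD i ("", 0)).2)).eraseIdx i
  else rs

theorem pvIdxStep_length_lt (runs : List (String × Int)) (i : Nat) (hi : i < runs.length) :
    (pvIdxStep runs i).length < runs.length := by
  have h1 : (runs.eraseIdx i).length = runs.length - 1 := by
    rw [List.length_eraseIdx]
    simp [hi]
  show (if 0 < i ∧ i < (runs.eraseIdx i).length ∧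
        ((runs.eraseIdx i).getD (i - 1) ("", 0)).1 = ((runs.eraseIdx i).getD i ("", 0)).1 then
      ((runs.eraseIdx i).set (i - 1) (((runs.eraseIdx i).getD (i - 1) ("", 0)).1,
        ((runs.eraseIdx i).getD (i - 1) ("", 0)).2 + ((runs.eraseIdx i).getD i ("", 0)).2)).eraseIdx i
    else runs.eraseIdx i).length < runs.length
  split_ifs with hc
  · have h2 := List.length_eraseIdx_le ((runs.eraseIdx i).set (i - 1)
      (((runs.eraseIdx i).getD (i - 1) ("", 0)).1,
        ((runs.eraseIdx i).getD (i - 1) ("", 0)).2 + ((runs.eraseIdx i).getD i ("", 0)).2)) i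
    rw [List.length_set, h1] at h2
    omega
  · omega

-- while True: i = next((j for j, r in enumerate(runs) if r[1] >= 3), None); if i is None: break; <del + merge>
def pvCrushLoop (runs : List (String × Int)) : List (String × Int) :=
  match h : runs.findIdx? (fun r => 3 ≤ r.2) with
  | none => runs
  | some i => pvCrushLoop (pvIdxStep runs i)
termination_by runs.length
decreasing_by
  exact pvIdxStep_length_lt runs i (List.findIdx?_eq_some_iff_findIdx_eq.mp h).1

-- the run-length-encoding loop of B
def pvRleStep (runs : List (String × Int)) (x : String) : List (String × Int) :=
  if runs ≠ [] ∧ (pvLast runs).1 = x then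
    runs.dropLast ++ [((pvLast runs).1, (pvLast runs).2 + 1)]
  else
    runs ++ [(x, 1)]

def crush_candy_alt (arr : List String) : String :=
  let runs := arr.foldl pvRleStep []
  PySem.Str.join "" ((pvCrushLoop runs).map (fun r => r.1))

-- ===== PRECONDITION & SPEC =====
-- A reads arr[0] unconditionally, so it raises IndexError on the empty list; everything else is fine.
def Pre_crush_candy (arr : List String) : Prop := arr ≠ []
instance (arr : List String) : Decidable (Pre_crush_candy arr) := by unfold Pre_crush_candy; infer_instance
def pvWitness_crush_candy : List String := (["a", "a", "b", "b", "b", "a"])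

def Spec_crush_candy (arr : List String) (out : String) : Prop := out = crush_candy_alt arr
instance (arr : List String) (out : String) : Decidable (Spec_crush_candy arr out) := by unfold Spec_crush_candy; infer_instance

-- ===== CLAIM (what is proved, stated in full; the proofs are below) =====
def Claim_equal_crush_candy : Prop := ∀ (arr : List String), Dom_crush_candy arr → Pre_crush_candy arr → Spec_crush_candy arr (crush_candy arr)

-- ===== LEMMAS AND PROOFS =====

-- the one-element stack transition of A, expressed against the stack's own top
def pvStep (st : List (String × Int)) (x : String) : List (String × Int) :=
  if st = [] then [(x, 1)]
  else if (pvLast st).1 = x then st.dropLast ++ [((pvLast st).1, (pvLast st).2 + 1)]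
  else
    let st1 := if 3 ≤ (pvLast st).2 then st.dropLast else st
    if st1 ≠ [] ∧ (pvLast st1).1 = x then st1.dropLast ++ [((pvLast st1).1, (pvLast st1).2 + 1)]
    else st1 ++ [(x, 1)]

-- final pop + keys
def pvFin (res : List (String × Int)) : List String :=
  (if 3 ≤ (pvLast res).2 then res.dropLast else res).map (fun r => r.1)

def pvFlat (runs : List (String × Int)) : List String :=
  runs.flatMap (fun r => List.replicate r.2.toNat r.1)

def pvAlt (runs : List (String × Int)) : Prop :=
  List.IsChain (· ≠ ·) (runs.map (fun r => r.1))

def pvOnes (runs : List (String × Int)) : Prop := ∀ r ∈ runs, 1 ≤ r.2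

-- proof-side recursive description of one pass of B's while-loop:
-- the leftmost run of count ≥ 3 deleted (equal neighbours merged), or none if there is no such run
def pvRemoved : List (String × Int) → Option (List (String × Int))
  | [] => none
  | (k, c) :: rest =>
    if 3 ≤ c then some rest
    else
      match pvRemoved rest with
      | none => none
      | some sub =>
        match sub with
        | (k2, c2) :: sub' => if k2 = k then some ((k, c + c2) :: sub') else some ((k, c) :: sub)
        | [] => some [(k, c)]

def pvMerge (k : String) (c : Int) : Option (List (String × Int)) → Option (List (String × Int))
  | none => none
  | some [] => some [(k, c)]
  | some ((k2, c2) :: sub') => if k2 = k then some ((k, c + c2) :: sub') else some ((k, c) :: (k2, c2) :: sub')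

theorem pvRemoved_cons (k : String) (c : Int) (rest : List (String × Int)) :
    pvRemoved ((k, c) :: rest) = if 3 ≤ c then some rest else pvMerge k c (pvRemoved rest) := by
  by_cases h3 : 3 ≤ c
  · simp [pvRemoved, h3]
  · simp only [pvRemoved, if_neg h3]
    cases h : pvRemoved rest with
    | none => simp [pvMerge]
    | some sub =>
      cases sub with
      | nil => simp [pvMerge]
      | cons s0 t =>
        obtain ⟨k2, c2⟩ := s0
        simp [pvMerge]

theorem pvIdxStep_def (runs : List (String × Int)) (i : Nat) :
    pvIdxStep runs i =
      if 0 < i ∧ i < (runs.eraseIdx i).length ∧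
          ((runs.eraseIdx i).getD (i - 1) ("", 0)).1 = ((runs.eraseIdx i).getD i ("", 0)).1 then
        ((runs.eraseIdx i).set (i - 1) (((runs.eraseIdx i).getD (i - 1) ("", 0)).1,
          ((runs.eraseIdx i).getD (i - 1) ("", 0)).2 + ((runs.eraseIdx i).getD i ("", 0)).2)).eraseIdx i
      else runs.eraseIdx i := rfl

theorem pvAlt_concat (l : List (String × Int)) (a : String × Int)
    (h : pvAlt l) (hlast : ∀ x ∈ l.getLast?, x.1 ≠ a.1) : pvAlt (l ++ [a]) := by
  unfold pvAlt
  rw [List.map_append]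
  rw [List.isChain_append]
  refine ⟨h, by simp [pvAlt], ?_⟩
  intro x hx y hy
  simp only [List.map_cons, List.map_nil, List.head?_cons, Option.mem_def, Option.some_inj] at hy
  subst hy
  rw [List.getLast?_map] at hx
  cases hl : l.getLast? with
  | none => rw [hl] at hx; simp at hx
  | some g =>
    rw [hl] at hx
    simp only [Option.map_some, Option.mem_def, Option.some_inj] at hx
    subst hx
    exact hlast g hl

theorem pvLast_singleton (a : String × Int) : pvLast [a] = a := by
  simp [pvLast]

theorem pvLast_concat (s : List (String × Int)) (a : String × Int) : pvLast (s ++ [a]) = a := by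
  simp [pvLast]

theorem pvAlt_cons (a : String × Int) (l : List (String × Int)) :
    pvAlt (a :: l) ↔ (∀ hd ∈ l.head?, a.1 ≠ hd.1) ∧ pvAlt l := by
  simp only [pvAlt, List.map_cons, List.isChain_cons, List.head?_map]
  constructor
  · rintro ⟨h1, h2⟩
    exact ⟨fun hd hhd => h1 hd.1 (by rw [hhd]; rfl), h2⟩
  · rintro ⟨h1, h2⟩
    refine ⟨fun y hy => ?_, h2⟩
    cases hh : l.head? with
    | none => rw [hh] at hy; simp at hy
    | some hd =>
      rw [hh] at hy
      simp only [Option.map_some, Option.mem_def, Option.some_inj] at hy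
      subst hy
      exact h1 hd hh

theorem pvLast_eq_getLast (s : List (String × Int)) (h : s ≠ []) : pvLast s = s.getLast h := by
  simp [pvLast, List.getLast?_eq_some_getLast h]

theorem pvFlat_cons (a : String × Int) (l : List (String × Int)) :
    pvFlat (a :: l) = List.replicate a.2.toNat a.1 ++ pvFlat l := by
  simp [pvFlat]

theorem pvFlat_concat (l : List (String × Int)) (a : String × Int) :
    pvFlat (l ++ [a]) = pvFlat l ++ List.replicate a.2.toNat a.1 := by
  simp [pvFlat]

theorem step_push (s : List (String × Int)) (k : String)
    (hs : s = [] ∨ ((pvLast s).1 ≠ k ∧ (pvLast s).2 < 3)) :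
    pvStep s k = s ++ [(k, 1)] := by
  by_cases hs0 : s = []
  · subst hs0; simp [pvStep]
  · rcases hs with h | ⟨h1, h2⟩
    · exact absurd h hs0
    · have h3 : ¬ 3 ≤ (pvLast s).2 := by omega
      simp [pvStep, hs0, h1, h3]

theorem fold_repl (m : Nat) (s : List (String × Int)) (k : String) (j : Int) :
    (List.replicate m k).foldl pvStep (s ++ [(k, j)]) = s ++ [(k, j + m)] := by
  induction m generalizing j with
  | zero => simp
  | succ m ih =>
    rw [List.replicate_succ, List.foldl_cons]
    have hne : s ++ [(k, j)] ≠ [] := by simp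
    have hstep : pvStep (s ++ [(k, j)]) k = s ++ [(k, j + 1)] := by
      simp [pvStep, hne, pvLast_concat]
    rw [hstep, ih (j + 1)]
    congr 2
    push_cast
    ring_nf

theorem fold_repl_push (s : List (String × Int)) (k : String) (c : Int) (hc : 1 ≤ c)
    (hs : s = [] ∨ ((pvLast s).1 ≠ k ∧ (pvLast s).2 < 3)) :
    (List.replicate c.toNat k).foldl pvStep s = s ++ [(k, c)] := by
  have hc0 : c.toNat = (c.toNat - 1) + 1 := by omega
  rw [hc0, List.replicate_succ, List.foldl_cons, step_push s k hs, fold_repl]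
  have : (1 : Int) + ((c.toNat - 1 : Nat) : Int) = c := by omega
  rw [this]

-- skipping a pending run of count ≥ 3 on top of the stack does not change the final answer
theorem skip_lemma (v : List String) (s : List (String × Int)) (k : String) (c : Int)
    (hc : 3 ≤ c) (hs : s = [] ∨ (pvLast s).2 < 3)
    (hv : ∀ y ∈ v.head?, y ≠ k) :
    pvFin (v.foldl pvStep (s ++ [(k, c)])) = pvFin (v.foldl pvStep s) := by
  cases v with
  | nil =>
    simp only [List.foldl_nil]
    unfold pvFin
    rw [pvLast_concat]
    simp only [hc, if_pos, List.dropLast_concat]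
    rcases hs with h | h
    · subst h; simp [pvLast]
    · have h3 : ¬ 3 ≤ (pvLast s).2 := by omega
      simp [h3]
  | cons y v' =>
    have hy : y ≠ k := hv y (by simp)
    have hy' : k ≠ y := fun h => hy h.symm
    have hne : s ++ [(k, c)] ≠ [] := by simp
    have hstep : pvStep (s ++ [(k, c)]) y = pvStep s y := by
      by_cases hs0 : s = []
      · subst hs0
        simp [pvStep, pvLast_singleton, hy', hc]
      · have h3 : ¬ 3 ≤ (pvLast s).2 := by
          rcases hs with h | h
          · exact absurd h hs0
          · omega
        by_cases hk : (pvLast s).1 = y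
        · simp [pvStep, hne, pvLast_concat, hy', hc, hs0, hk, List.dropLast_concat]
        · simp [pvStep, hne, pvLast_concat, hy', hc, hs0, hk, h3, List.dropLast_concat]
    rw [List.foldl_cons, List.foldl_cons, hstep]

-- folding a flat list of small runs just appends them to the stack
theorem fold_flat (runs : List (String × Int)) : ∀ (s : List (String × Int)),
    pvAlt runs → (∀ r ∈ runs, 1 ≤ r.2 ∧ r.2 < 3) →
    (∀ hd ∈ runs.head?, s = [] ∨ ((pvLast s).1 ≠ hd.1 ∧ (pvLast s).2 < 3)) →
    (pvFlat runs).foldl pvStep s = s ++ runs := by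
  induction runs with
  | nil => intro s _ _ _; simp [pvFlat]
  | cons hd rest ih =>
    intro s hA hS hsep
    obtain ⟨k, c⟩ := hd
    have h1 : 1 ≤ c ∧ c < 3 := hS (k, c) (List.mem_cons_self ..)
    have hsep' := hsep (k, c) (by simp)
    rw [pvFlat_cons, List.foldl_append]
    have hpush : (List.replicate (k, c).2.toNat (k, c).1).foldl pvStep s = s ++ [(k, c)] := by
      apply fold_repl_push s k c h1.1
      rcases hsep' with h | h
      · exact Or.inl h
      · exact Or.inr h
    rw [hpush]
    have hA' := (pvAlt_cons _ _).mp hA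
    rw [ih (s ++ [(k, c)]) hA'.2 (fun r hr => hS r (List.mem_cons_of_mem _ hr))
        (fun hd hhd => Or.inr ⟨by rw [pvLast_concat]; exact hA'.1 hd hhd, by rw [pvLast_concat]; exact h1.2⟩)]
    simp

theorem pvFlat_head (l : List (String × Int)) (hO : pvOnes l) (y : String)
    (hy : y ∈ (pvFlat l).head?) : ∃ hd ∈ l.head?, y = hd.1 := by
  cases l with
  | nil => simp [pvFlat] at hy
  | cons a l' =>
    have h1 : 1 ≤ a.2 := hO a (List.mem_cons_self ..)
    have h2 : a.2.toNat = (a.2.toNat - 1) + 1 := by omega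
    rw [pvFlat_cons, h2, List.replicate_succ, List.cons_append, List.head?_cons] at hy
    simp only [Option.mem_def, Option.some_inj] at hy
    exact ⟨a, by simp, hy.symm⟩

theorem rem_pres (runs : List (String × Int)) : ∀ (r : List (String × Int)),
    pvAlt runs → pvOnes runs → pvRemoved runs = some r →
    pvAlt r ∧ pvOnes r ∧ ∀ (s : List (String × Int)),
      (∀ hd ∈ runs.head?, s = [] ∨ ((pvLast s).1 ≠ hd.1 ∧ (pvLast s).2 < 3)) →
      (s = [] ∨ (pvLast s).2 < 3) →
      pvFin ((pvFlat r).foldl pvStep s) = pvFin ((pvFlat runs).foldl pvStep s) := by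
  induction runs with
  | nil => intro r _ _ h; simp [pvRemoved] at h
  | cons hd rest ih =>
    intro r hA hO h
    obtain ⟨k, c⟩ := hd
    have hAc := (pvAlt_cons _ _).mp hA
    have hA1 : ∀ hd ∈ rest.head?, k ≠ hd.1 := hAc.1
    have hA2 : pvAlt rest := hAc.2
    have hO1 : 1 ≤ c := hO (k, c) (List.mem_cons_self ..)
    have hO2 : pvOnes rest := fun q hq => hO q (List.mem_cons_of_mem _ hq)
    simp only [pvRemoved] at h
    split at h
    case isTrue h3 =>
      cases h
      refine ⟨hA2, hO2, ?_⟩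
      intro s hsep hs
      have hsep0 := hsep (k, c) (by simp)
      rw [pvFlat_cons, List.foldl_append, fold_repl_push s k c hO1 hsep0]
      rw [skip_lemma (pvFlat rest) s k c h3 hs ?_]
      intro y hy
      obtain ⟨g, hg, hyg⟩ := pvFlat_head rest hO2 y hy
      subst hyg
      exact fun he => hA1 g hg he.symm
    case isFalse h3 =>
      cases hsub : pvRemoved rest with
      | none => rw [hsub] at h; simp at h
      | some sub =>
        rw [hsub] at h
        obtain ⟨sA, sO, sEq⟩ := ih sub hA2 hO2 hsub
        have key : ∀ (s : List (String × Int)),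
            (∀ hd ∈ ((k, c) :: rest).head?, s = [] ∨ ((pvLast s).1 ≠ hd.1 ∧ (pvLast s).2 < 3)) →
            (s = [] ∨ (pvLast s).2 < 3) →
            pvFin ((List.replicate c.toNat k ++ pvFlat sub).foldl pvStep s)
              = pvFin ((pvFlat ((k, c) :: rest)).foldl pvStep s) := by
          intro s hsep hs
          have hsep0 := hsep (k, c) (by simp)
          rw [List.foldl_append, fold_repl_push s k c hO1 hsep0]
          rw [pvFlat_cons, List.foldl_append, fold_repl_push s k c hO1 hsep0]
          apply sEq
          · intro g hg
            exact Or.inr ⟨by rw [pvLast_concat]; exact hA1 g hg, by rw [pvLast_concat]; omega⟩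
          · exact Or.inr (by rw [pvLast_concat]; omega)
        cases sub with
        | nil =>
          simp only [Option.some_inj] at h
          subst h
          refine ⟨by simp [pvAlt], ?_, ?_⟩
          · intro q hq; simp only [List.mem_singleton] at hq; subst hq; exact hO1
          · intro s hsep hs
            have := key s hsep hs
            simpa [pvFlat] using this
        | cons s0 sub' =>
          obtain ⟨k2, c2⟩ := s0
          have hc2 : 1 ≤ c2 := sO (k2, c2) (List.mem_cons_self ..)
          have hsAc := (pvAlt_cons _ _).mp sA
          simp only at h
          split at h
          case isTrue hkk =>
            subst hkk
            cases h
            refine ⟨?_, ?_, ?_⟩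
            · exact (pvAlt_cons _ _).mpr ⟨hsAc.1, hsAc.2⟩
            · intro q hq
              rcases List.mem_cons.mp hq with h0 | h0
              · subst h0; simp; omega
              · exact sO q (List.mem_cons_of_mem _ h0)
            · intro s hsep hs
              have hflat : pvFlat ((k2, c + c2) :: sub') = List.replicate c.toNat k2 ++ pvFlat ((k2, c2) :: sub') := by
                rw [pvFlat_cons, pvFlat_cons]
                have : (c + c2).toNat = c.toNat + c2.toNat := by omega
                rw [this, List.replicate_add, List.append_assoc]
              rw [hflat]
              exact key s hsep hs
          case isFalse hkk =>
            cases h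
            refine ⟨?_, ?_, ?_⟩
            · refine (pvAlt_cons _ _).mpr ⟨?_, sA⟩
              intro g hg
              simp only [List.head?_cons, Option.mem_def, Option.some_inj] at hg
              subst hg
              exact fun he => hkk he.symm
            · intro q hq
              rcases List.mem_cons.mp hq with h0 | h0
              · subst h0; exact hO1
              · exact sO q h0
            · intro s hsep hs
              rw [pvFlat_cons]
              exact key s hsep hs

theorem removed_none_small (runs : List (String × Int)) (h : pvRemoved runs = none) :
    ∀ r ∈ runs, r.2 < 3 := by
  induction runs with
  | nil => simp
  | cons hd rest ih =>
    obtain ⟨k, c⟩ := hd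
    simp only [pvRemoved] at h
    split at h
    · simp at h
    · cases hsub : pvRemoved rest with
      | none =>
        intro r hr
        rcases List.mem_cons.mp hr with h0 | h0
        · subst h0; omega
        · exact ih hsub r h0
      | some sub =>
        rw [hsub] at h
        cases sub with
        | nil => simp at h
        | cons s0 sub' => obtain ⟨k2, c2⟩ := s0; simp only at h; split at h <;> simp at h

theorem removed_none_of_small (runs : List (String × Int)) (h : ∀ r ∈ runs, r.2 < 3) :
    pvRemoved runs = none := by
  induction runs with
  | nil => rfl
  | cons hd rest ih =>
    obtain ⟨k, c⟩ := hd
    have hc : c < 3 := h (k, c) (List.mem_cons_self ..)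
    simp only [pvRemoved, if_neg (by omega : ¬ 3 ≤ c)]
    rw [ih (fun r hr => h r (List.mem_cons_of_mem _ hr))]

theorem bridge_none (runs : List (String × Int))
    (h : runs.findIdx? (fun r => 3 ≤ r.2) = none) : pvRemoved runs = none := by
  apply removed_none_of_small
  intro r hr
  have := List.findIdx?_eq_none_iff.mp h r hr
  simp at this
  omega

theorem idxStep_cons_succ (a : String × Int) (l : List (String × Int)) (j : Nat) :
    pvIdxStep (a :: l) (j + 2) = a :: pvIdxStep l (j + 1) := by
  show (if 0 < j + 2 ∧ j + 2 < ((a :: l).eraseIdx (j + 2)).length ∧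
        (((a :: l).eraseIdx (j + 2)).getD (j + 2 - 1) ("", 0)).1 = (((a :: l).eraseIdx (j + 2)).getD (j + 2) ("", 0)).1 then
      (((a :: l).eraseIdx (j + 2)).set (j + 2 - 1) ((((a :: l).eraseIdx (j + 2)).getD (j + 2 - 1) ("", 0)).1,
        (((a :: l).eraseIdx (j + 2)).getD (j + 2 - 1) ("", 0)).2 + (((a :: l).eraseIdx (j + 2)).getD (j + 2) ("", 0)).2)).eraseIdx (j + 2)
    else (a :: l).eraseIdx (j + 2))
    = a :: (if 0 < j + 1 ∧ j + 1 < (l.eraseIdx (j + 1)).length ∧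
        ((l.eraseIdx (j + 1)).getD (j + 1 - 1) ("", 0)).1 = ((l.eraseIdx (j + 1)).getD (j + 1) ("", 0)).1 then
      ((l.eraseIdx (j + 1)).set (j + 1 - 1) (((l.eraseIdx (j + 1)).getD (j + 1 - 1) ("", 0)).1,
        ((l.eraseIdx (j + 1)).getD (j + 1 - 1) ("", 0)).2 + ((l.eraseIdx (j + 1)).getD (j + 1) ("", 0)).2)).eraseIdx (j + 1)
    else l.eraseIdx (j + 1))
  have e0 : j + 2 - 1 = (j + 1 - 1) + 1 := by omega
  simp only [List.eraseIdx_cons_succ, List.length_cons, e0, List.getD_cons_succ, List.set_cons_succ]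
  have hc : (0 < j + 2 ∧ j + 2 < (l.eraseIdx (j + 1)).length + 1 ∧
        ((l.eraseIdx (j + 1)).getD (j + 1 - 1) ("", 0)).1 = ((l.eraseIdx (j + 1)).getD (j + 1) ("", 0)).1)
      ↔ (0 < j + 1 ∧ j + 1 < (l.eraseIdx (j + 1)).length ∧
        ((l.eraseIdx (j + 1)).getD (j + 1 - 1) ("", 0)).1 = ((l.eraseIdx (j + 1)).getD (j + 1) ("", 0)).1) := by
    constructor <;> rintro ⟨h1, h2, h3⟩ <;> exact ⟨by omega, by omega, h3⟩
  rw [if_congr hc rfl rfl]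
  split_ifs <;> rfl

theorem idxStep_head (a : String × Int) (l : List (String × Int)) (j : Nat) :
    pvIdxStep (a :: l) (j + 1) ≠ [] ∧ ((pvIdxStep (a :: l) (j + 1)).headD ("", 0)).1 = a.1 := by
  rw [pvIdxStep_def, List.eraseIdx_cons_succ]
  split_ifs with hc
  · cases j with
    | zero =>
      simp only [Nat.add_sub_cancel] at hc ⊢
      rw [List.set_cons_zero, List.eraseIdx_cons_succ]
      refine ⟨by simp, by simp [List.getD_cons_zero]⟩
    | succ j' =>
      have e0 : j' + 1 + 1 - 1 = j' + 1 := by omega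
      rw [e0, List.set_cons_succ, List.eraseIdx_cons_succ]
      exact ⟨by simp, by simp⟩
  · exact ⟨by simp, by simp⟩

theorem bridge_some (runs : List (String × Int)) : ∀ (i : Nat), pvAlt runs →
    runs.findIdx? (fun r => 3 ≤ r.2) = some i → pvRemoved runs = some (pvIdxStep runs i) := by
  induction runs with
  | nil => intro i _ h; simp at h
  | cons hd rest ih =>
    intro i hA h
    obtain ⟨k, c⟩ := hd
    rw [List.findIdx?_cons] at h
    by_cases hc3 : 3 ≤ c
    · rw [if_pos (by simpa using hc3)] at h
      simp only [Option.some_inj] at h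
      subst h
      have hstep : pvIdxStep ((k, c) :: rest) 0 = rest := by
        rw [pvIdxStep_def, if_neg (by simp), List.eraseIdx_cons_zero]
      rw [hstep, pvRemoved_cons, if_pos hc3]
    · rw [if_neg (by simpa using hc3)] at h
      obtain ⟨j, hj, hij⟩ := Option.map_eq_some_iff.mp h
      subst hij
      have hA2 : pvAlt rest := ((pvAlt_cons _ _).mp hA).2
      have hA1 : ∀ hd ∈ rest.head?, k ≠ hd.1 := ((pvAlt_cons _ _).mp hA).1
      have hsub := ih j hA2 hj
      cases rest with
      | nil => simp at hj
      | cons r0 rest1 =>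
        cases j with
        | zero =>
          have hstep0 : pvIdxStep (r0 :: rest1) 0 = rest1 := by
            rw [pvIdxStep_def, if_neg (by simp), List.eraseIdx_cons_zero]
          rw [hstep0] at hsub
          rw [pvRemoved_cons, if_neg hc3, hsub]
          cases rest1 with
          | nil =>
            have hstep1 : pvIdxStep ((k, c) :: [r0]) 1 = [(k, c)] := by
              rw [pvIdxStep_def, List.eraseIdx_cons_succ, List.eraseIdx_cons_zero]
              rw [if_neg (by simp)]
            rw [hstep1]
            simp [pvMerge]
          | cons s0 rest2 =>
            obtain ⟨k2, c2⟩ := s0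
            by_cases hkk : k2 = k
            · subst hkk
              have hstep1 : pvIdxStep ((k2, c) :: r0 :: (k2, c2) :: rest2) 1 = (k2, c + c2) :: rest2 := by
                rw [pvIdxStep_def, List.eraseIdx_cons_succ, List.eraseIdx_cons_zero]
                rw [if_pos (by simp)]
                rw [List.set_cons_zero, List.eraseIdx_cons_succ, List.eraseIdx_cons_zero]
                simp
              rw [hstep1]
              simp [pvMerge]
            · have hstep1 : pvIdxStep ((k, c) :: r0 :: (k2, c2) :: rest2) 1 = (k, c) :: (k2, c2) :: rest2 := by
                rw [pvIdxStep_def, List.eraseIdx_cons_succ, List.eraseIdx_cons_zero]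
                split_ifs with hcon
                · exact absurd (show k2 = k from ((by simpa using hcon.2.2 : k = k2)).symm) hkk
                · rfl
              rw [hstep1]
              simp [pvMerge, hkk]
        | succ j'' =>
          have hhead := idxStep_head r0 rest1 j''
          have hne : k ≠ r0.1 := hA1 r0 (by simp)
          rw [pvRemoved_cons, if_neg hc3, hsub, idxStep_cons_succ (k, c) (r0 :: rest1) j'']
          cases hcase : pvIdxStep (r0 :: rest1) (j'' + 1) with
          | nil => exact absurd hcase hhead.1
          | cons s0 sub'' =>
            obtain ⟨k2, c2⟩ := s0
            have hk2 : k2 = r0.1 := by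
              rw [hcase] at hhead
              simpa using hhead.2
            have hne2 : ¬ k2 = k := by
              rw [hk2]
              exact fun he => hne he.symm
            simp only [pvMerge]
            rw [if_neg hne2]

theorem loop_keys (runs : List (String × Int)) (hA : pvAlt runs) (hO : pvOnes runs) :
    (pvCrushLoop runs).map (fun r => r.1) = pvFin ((pvFlat runs).foldl pvStep []) := by
  induction runs using pvCrushLoop.induct with
  | case1 runs hnone =>
    have hloop : pvCrushLoop runs = runs := by
      rw [pvCrushLoop.eq_def]
      split
      · rfl
      · next r heq => rw [hnone] at heq; cases heq
    rw [hloop]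
    have hsmall := removed_none_small runs (bridge_none runs hnone)
    rw [fold_flat runs [] hA (fun q hq => ⟨hO q hq, hsmall q hq⟩) (fun _ _ => Or.inl rfl)]
    unfold pvFin
    rw [List.nil_append]
    have : ¬ 3 ≤ (pvLast runs).2 := by
      by_cases hne : runs = []
      · subst hne; simp [pvLast]
      · rw [pvLast_eq_getLast runs hne]
        have := hsmall _ (List.getLast_mem hne)
        omega
    rw [if_neg this]
  | case2 runs i hsome ih =>
    have hloop : pvCrushLoop runs = pvCrushLoop (pvIdxStep runs i) := by
      rw [pvCrushLoop.eq_def]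
      split
      · next heq => rw [hsome] at heq; cases heq
      · next i' heq =>
        rw [hsome] at heq
        cases heq
        rfl
    have hrem := bridge_some runs i hA hsome
    obtain ⟨rA, rO, rEq⟩ := rem_pres runs (pvIdxStep runs i) hA hO hrem
    rw [hloop, ih rA rO, rEq [] (fun _ _ => Or.inl rfl) (Or.inl rfl)]

theorem rleStep_inv (runs : List (String × Int)) (x : String) (hA : pvAlt runs) (hO : pvOnes runs) :
    pvAlt (pvRleStep runs x) ∧ pvOnes (pvRleStep runs x) ∧
      pvFlat (pvRleStep runs x) = pvFlat runs ++ [x] := by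
  unfold pvRleStep
  by_cases hcond : runs ≠ [] ∧ (pvLast runs).1 = x
  · rw [if_pos hcond]
    obtain ⟨hne, hkey⟩ := hcond
    have hlast : pvLast runs = runs.getLast hne := pvLast_eq_getLast runs hne
    have hdec : runs.dropLast ++ [runs.getLast hne] = runs := List.dropLast_append_getLast hne
    have hc1 : 1 ≤ (runs.getLast hne).2 := hO _ (List.getLast_mem hne)
    refine ⟨?_, ?_, ?_⟩
    · have hm : (runs.dropLast ++ [((pvLast runs).1, (pvLast runs).2 + 1)]).map (fun r => r.1)
          = runs.map (fun r => r.1) := by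
        rw [hlast]
        conv_rhs => rw [← hdec]
        simp
      unfold pvAlt
      rw [hm]
      exact hA
    · intro r hr
      rcases List.mem_append.mp hr with h0 | h0
      · exact hO r (List.dropLast_subset _ h0)
      · simp only [List.mem_singleton] at h0
        subst h0
        rw [hlast]
        omega
    · rw [pvFlat_concat, hlast]
      conv_rhs => rw [← hdec]
      rw [pvFlat_concat]
      have hx : x = (runs.getLast hne).1 := by rw [← hkey, hlast]
      have ht : ((runs.getLast hne).2 + 1).toNat = (runs.getLast hne).2.toNat + 1 := by omega
      simp only [ht, List.replicate_succ']
      rw [hx]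
      simp
  · rw [if_neg hcond]
    refine ⟨?_, ?_, ?_⟩
    · apply pvAlt_concat _ _ hA
      intro g hg
      by_cases hne : runs = []
      · subst hne; simp at hg
      · have : pvLast runs = g := by
          unfold pvLast
          rw [Option.mem_def.mp hg]
          rfl
        intro heq
        exact hcond ⟨hne, by rw [this]; exact heq⟩
    · intro r hr
      rcases List.mem_append.mp hr with h0 | h0
      · exact hO r h0
      · simp only [List.mem_singleton] at h0; subst h0; norm_num
    · rw [pvFlat_concat]; rfl

theorem rle_inv (xs : List String) : ∀ (runs : List (String × Int)),
    pvAlt runs → pvOnes runs →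
    pvAlt (xs.foldl pvRleStep runs) ∧ pvOnes (xs.foldl pvRleStep runs) ∧
      pvFlat (xs.foldl pvRleStep runs) = pvFlat runs ++ xs := by
  induction xs with
  | nil => intro runs hA hO; simpa using ⟨hA, hO⟩
  | cons x xs ih =>
    intro runs hA hO
    rw [List.foldl_cons]
    obtain ⟨h1, h2, h3⟩ := rleStep_inv runs x hA hO
    obtain ⟨g1, g2, g3⟩ := ih _ h1 h2
    exact ⟨g1, g2, by rw [g3, h3]; simp⟩

-- A-side: index loop with arr[i], arr[i-1] = fold over adjacent pairs
-- the loop body of A as a function of (previous element, current element)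
def pvBody (res : List (String × Int)) (pe xe : String) : List (String × Int) :=
  if xe ≠ pe then
    let res := if 3 ≤ (pvLast res).2 then res.dropLast else res
    if res ≠ [] ∧ (pvLast res).1 = xe then res.dropLast ++ [((pvLast res).1, (pvLast res).2 + 1)]
    else res ++ [(xe, 1)]
  else res.dropLast ++ [((pvLast res).1, (pvLast res).2 + 1)]

theorem zip_concat {α : Type} (xs : List α) (y : α) (h : xs ≠ []) :
    (xs ++ [y]).zip ((xs ++ [y]).tail) = xs.zip xs.tail ++ [(xs.getLast h, y)] := by
  induction xs with
  | nil => exact absurd rfl h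
  | cons a t ih =>
    cases t with
    | nil => simp
    | cons b t' =>
      have hne : b :: t' ≠ [] := by simp
      have ihh := ih hne
      simp only [List.cons_append, List.tail_cons, List.zip_cons_cons] at ihh ⊢
      rw [ihh]
      simp [List.getLast_cons]

theorem pairfold {S : Type} (xs : List String) (d : String)
    (G : S → String → String → S) (init : S) :
    (PySem.List.pyRange 1 (xs.length : Int) 1).foldl
      (fun s i => G s (PySem.List.pyGetD xs (i - 1) d) (PySem.List.pyGetD xs i d)) init
    = (xs.zip xs.tail).foldl (fun s p => G s p.1 p.2) init := by
  induction xs using List.reverseRecOn generalizing init with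
  | nil =>
    rw [PySem.List.pyRange_one_eq_nil (by norm_num)]
    simp
  | append_singleton xs y ih =>
    by_cases h0 : xs = []
    · subst h0
      rw [show ((([] : List String) ++ [y]).length : Int) = 1 by simp]
      rw [PySem.List.pyRange_one_eq_nil (by norm_num)]
      simp
    · have hpos : 1 ≤ (xs.length : Int) := by
        have := List.length_pos_iff.mpr h0
        omega
      have hlen : (((xs ++ [y]).length : Int)) = (xs.length : Int) + 1 := by
        simp [List.length_append]
      rw [hlen, PySem.List.pyRange_one_succ_right hpos, List.foldl_append]
      have hcong : (PySem.List.pyRange 1 (xs.length : Int) 1).foldl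
            (fun s i => G s (PySem.List.pyGetD (xs ++ [y]) (i - 1) d) (PySem.List.pyGetD (xs ++ [y]) i d)) init
          = (PySem.List.pyRange 1 (xs.length : Int) 1).foldl
            (fun s i => G s (PySem.List.pyGetD xs (i - 1) d) (PySem.List.pyGetD xs i d)) init := by
        apply PySem.List.foldl_congr_mem
        intro acc i hi
        have hmem := PySem.List.mem_pyRange_one.mp hi
        have hlapp : ((xs ++ [y]).length : Int) = (xs.length : Int) + 1 := by
          simp [List.length_append]
        have e1 : PySem.List.pyGetD (xs ++ [y]) (i - 1) d = PySem.List.pyGetD xs (i - 1) d := by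
          rw [PySem.List.pyGetD_eq_getElem (xs ++ [y]) d (by omega) (by omega),
              PySem.List.pyGetD_eq_getElem xs d (by omega) (by omega)]
          exact List.getElem_append_left (by omega)
        have e2 : PySem.List.pyGetD (xs ++ [y]) i d = PySem.List.pyGetD xs i d := by
          rw [PySem.List.pyGetD_eq_getElem (xs ++ [y]) d (by omega) (by omega),
              PySem.List.pyGetD_eq_getElem xs d (by omega) (by omega)]
          exact List.getElem_append_left (by omega)
        rw [e1, e2]
      rw [hcong, ih]
      have hlapp : ((xs ++ [y]).length : Int) = (xs.length : Int) + 1 := by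
        simp [List.length_append]
      have hy : PySem.List.pyGetD (xs ++ [y]) (xs.length : Int) d = y := by
        rw [PySem.List.pyGetD_eq_getElem (xs ++ [y]) d (by omega) (by omega)]
        rw [List.getElem_append_right (by simp)]
        simp
      have hx : PySem.List.pyGetD (xs ++ [y]) ((xs.length : Int) - 1) d = xs.getLast h0 := by
        have hl : 1 ≤ xs.length := List.length_pos_iff.mpr h0
        rw [PySem.List.pyGetD_eq_getElem (xs ++ [y]) d (by omega) (by omega)]
        rw [List.getElem_append_left (by omega)]
        rw [List.getLast_eq_getElem]
        congr 1
        omega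
      rw [zip_concat xs y h0, List.foldl_append]
      simp [hy, hx]

theorem pvStep_inv (s : List (String × Int)) (x : String) :
    pvStep s x ≠ [] ∧ (pvLast (pvStep s x)).1 = x := by
  unfold pvStep
  by_cases h1 : s = []
  · rw [if_pos h1]
    exact ⟨by simp, by rw [pvLast_singleton]⟩
  · rw [if_neg h1]
    by_cases h2 : (pvLast s).1 = x
    · rw [if_pos h2]
      exact ⟨by simp, by rw [pvLast_concat]; exact h2⟩
    · rw [if_neg h2]
      by_cases h3 : (if 3 ≤ (pvLast s).2 then s.dropLast else s) ≠ [] ∧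
          (pvLast (if 3 ≤ (pvLast s).2 then s.dropLast else s)).1 = x
      · rw [if_pos h3]
        exact ⟨by simp, by rw [pvLast_concat]; exact h3.2⟩
      · rw [if_neg h3]
        exact ⟨by simp, by rw [pvLast_concat]⟩

-- the loop body of A agrees with pvStep when the stack's top key is the previous element
theorem zipfold_step (ys : List String) : ∀ (p : String) (s : List (String × Int)),
    s ≠ [] → (pvLast s).1 = p →
    ((p :: ys).zip ys).foldl (fun res q => pvBody res q.1 q.2) s = ys.foldl pvStep s := by
  induction ys with
  | nil => intro p s _ _; simp
  | cons y ys' ih =>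
    intro p s hs hk
    have hstep : pvBody s p y = pvStep s y := by
      unfold pvBody pvStep
      by_cases hxy : y = p
      · subst hxy
        rw [if_neg (by simp), if_neg hs, if_pos hk]
      · have hky : ¬ (pvLast s).1 = y := by rw [hk]; exact fun he => hxy he.symm
        rw [if_pos hxy, if_neg hs, if_neg hky]
    show ((p, y) :: (y :: ys').zip ys').foldl (fun res q => pvBody res q.1 q.2) s = _
    rw [List.foldl_cons, List.foldl_cons]
    show ((y :: ys').zip ys').foldl (fun res q => pvBody res q.1 q.2) (pvBody s p y) = _
    rw [hstep]
    exact ih y (pvStep s y) (pvStep_inv s y).1 (pvStep_inv s y).2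

theorem a_as_step (arr : List String) (h : arr ≠ []) :
    crush_candy arr = PySem.Str.join "" (pvFin (arr.foldl pvStep [])) := by
  cases arr with
  | nil => exact absurd rfl h
  | cons x0 rest =>
    have h1 : crush_candy (x0 :: rest)
        = PySem.Str.join "" (pvFin ((PySem.List.pyRange 1 ((x0 :: rest).length : Int) 1).foldl
            (fun s i => pvBody s (PySem.List.pyGetD (x0 :: rest) (i - 1) "") (PySem.List.pyGetD (x0 :: rest) i ""))
            [(PySem.List.pyGetD (x0 :: rest) 0 "", 1)])) := rfl
    rw [h1, pairfold (x0 :: rest) "" pvBody]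
    have h2 : PySem.List.pyGetD (x0 :: rest) 0 "" = x0 := by
      simp [PySem.List.pyGetD_zero_cons]
    rw [h2]
    show PySem.Str.join "" (pvFin (((x0 :: rest).zip rest).foldl (fun s q => pvBody s q.1 q.2) [(x0, 1)])) = _
    rw [zipfold_step rest x0 [(x0, 1)] (by simp) (by rw [pvLast_singleton])]
    have h3 : [((x0 : String), (1 : Int))] = pvStep [] x0 := by simp [pvStep]
    rw [h3, ← List.foldl_cons]

theorem b_as_step (arr : List String) :
    crush_candy_alt arr = PySem.Str.join "" (pvFin (arr.foldl pvStep [])) := by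
  obtain ⟨hA, hO, hF⟩ := rle_inv arr [] (by simp [pvAlt]) (by intro q hq; simp at hq)
  have h1 : crush_candy_alt arr
      = PySem.Str.join "" ((pvCrushLoop (arr.foldl pvRleStep [])).map (fun r => r.1)) := rfl
  rw [h1, loop_keys _ hA hO]
  simp only [pvFlat, List.flatMap_nil, List.nil_append] at hF
  rw [show pvFlat (arr.foldl pvRleStep []) = arr from hF]

-- ===== VERDICT (by name: the statement is the Claim_ definition above) =====
theorem crush_candy_spec : Claim_equal_crush_candy := by
  intro arr _ hpre
  unfold Spec_crush_candy
  rw [a_as_step arr hpre, b_as_step arr]
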